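-- pv_equiv track=rewrite | github.com/imbaguanxin/MATH3175 | conjugacy.py | from_cycles
-- ===== SOURCE A (Python) =====
-- def cal_perm(a, b):
--     result = {}
--     for i in range(len(a)):
--         k = i + 1
--         result[k] = a[b[k]]
--     return result
--
-- def from_cycle(length, cyc):
--     result = {}
--     for i in range(length):
--         result[i + 1] = i + 1
--
--     for i in range(len(cyc) - 1):
--         curr = cyc[i]
--         nxt = cyc[i + 1]
--         result[curr] = nxt
--     result[cyc[-1]] = cyc[0]
--     return result
--
-- def from_cycles(length, cycs):
--     result = {}
--     for i in range(length):
--         result[i + 1] = i + 1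
--     for cyc in cycs:
--         cyc_dic = from_cycle(length, cyc)
--         result = cal_perm(result, cyc_dic)
--     return result
-- ===== SOURCE B (Python) =====
-- def from_cycles(length, cycs):
--     result = {i + 1: i + 1 for i in range(length)}
--     for cyc in cycs:
--         n = len(cyc)
--         succ = {}
--         for i in range(n):
--             succ[cyc[i]] = cyc[(i + 1) % n]
--         updates = {k: result[v] for k, v in succ.items() if k in result}
--         result.update(updates)
--     return result
-- ===== Notes on version B (the rewrite author's own statement) =====
-- stated objective: faster
-- what changed: Instead of rebuilding a full length-sized composed dict for every cycle (identity dict + cal_perm pass over all keys), B keeps one permutation dict and updates in place only the entries at each cycle's elements, read from a small successor map.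
import Mathlib
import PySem

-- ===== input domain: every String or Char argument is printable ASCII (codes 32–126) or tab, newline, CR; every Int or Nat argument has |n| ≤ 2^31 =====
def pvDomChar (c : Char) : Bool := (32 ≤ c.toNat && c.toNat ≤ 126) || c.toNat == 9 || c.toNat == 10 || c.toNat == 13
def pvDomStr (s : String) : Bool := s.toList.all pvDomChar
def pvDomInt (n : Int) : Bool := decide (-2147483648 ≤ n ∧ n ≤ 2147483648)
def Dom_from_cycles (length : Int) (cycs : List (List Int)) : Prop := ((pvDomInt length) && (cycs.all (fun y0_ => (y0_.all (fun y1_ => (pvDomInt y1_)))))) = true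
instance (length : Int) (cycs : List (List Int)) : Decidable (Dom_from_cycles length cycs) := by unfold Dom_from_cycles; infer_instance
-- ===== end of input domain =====

-- B replaces A's per-cycle rebuild of the whole composed dict by an in-place update of
-- only the cycle's own entries (objective: faster when cycles are short relative to length).

-- ===== PORT A =====
def pvCalPerm (a b : PySem.Dict Int Int) : PySem.Dict Int Int :=
  (PySem.List.pyRange 0 (a.size : Int) 1).foldl
    (fun r i => r.insert (i + 1) (a.getD (b.getD (i + 1) 0) 0)) PySem.Dict.empty

def pvFromCycle (length : Int) (cyc : List Int) : PySem.Dict Int Int :=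
  let r0 := (PySem.List.pyRange 0 length 1).foldl
    (fun r i => r.insert (i + 1) (i + 1)) PySem.Dict.empty
  let r1 := (PySem.List.pyRange 0 (PySem.List.len cyc - 1) 1).foldl
    (fun r i => r.insert (PySem.List.pyGetD cyc i 0) (PySem.List.pyGetD cyc (i + 1) 0)) r0
  r1.insert (PySem.List.pyGetD cyc (-1) 0) (PySem.List.pyGetD cyc 0 0)

def from_cycles (length : Int) (cycs : List (List Int)) : List (Int × Int) :=
  let init := (PySem.List.pyRange 0 length 1).foldl
    (fun r i => r.insert (i + 1) (i + 1)) PySem.Dict.empty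
  (cycs.foldl (fun result cyc => pvCalPerm result (pvFromCycle length cyc)) init).items

-- ===== PORT B =====
def pvSucc (cyc : List Int) : PySem.Dict Int Int :=
  (PySem.List.pyRange 0 (PySem.List.len cyc) 1).foldl
    (fun s i => s.insert (PySem.List.pyGetD cyc i 0)
      (PySem.List.pyGetD cyc (PySem.Int.mod (i + 1) (PySem.List.len cyc)) 0)) PySem.Dict.empty

def pvStepB (result : PySem.Dict Int Int) (cyc : List Int) : PySem.Dict Int Int :=
  let succ := pvSucc cyc
  let updates := succ.items.foldl
    (fun u kv => if result.contains kv.1 then u.insert kv.1 (result.getD kv.2 0) else u)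
    PySem.Dict.empty
  result.update updates.items

def from_cycles_alt (length : Int) (cycs : List (List Int)) : List (Int × Int) :=
  let init := (PySem.List.pyRange 0 length 1).foldl
    (fun r i => r.insert (i + 1) (i + 1)) PySem.Dict.empty
  (cycs.foldl pvStepB init).items

-- ===== PRECONDITION & SPEC =====
-- Pre_ is exactly the inputs on which A returns: every cycle is nonempty and, at the last
-- occurrence of each cycle element that lies in 1..length, the element's cyclic successor also
-- lies in 1..length (otherwise A raises IndexError/KeyError).
def Pre_from_cycles (length : Int) (cycs : List (List Int)) : Prop :=
  ∀ cyc ∈ cycs, cyc ≠ [] ∧ ∀ i : Nat, i < cyc.length →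
    (∀ j : Nat, j < cyc.length → i < j → cyc.getD j 0 ≠ cyc.getD i 0) →
    1 ≤ cyc.getD i 0 → cyc.getD i 0 ≤ length →
    1 ≤ cyc.getD ((i + 1) % cyc.length) 0 ∧ cyc.getD ((i + 1) % cyc.length) 0 ≤ length
instance (length : Int) (cycs : List (List Int)) : Decidable (Pre_from_cycles length cycs) := by
  unfold Pre_from_cycles; infer_instance

def pvWitness_from_cycles : Int × List (List Int) := (3, [[1, 2], [2, 3]])

def Spec_from_cycles (length : Int) (cycs : List (List Int)) (out : List (Int × Int)) : Prop := out = from_cycles_alt length cycs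
instance (length : Int) (cycs : List (List Int)) (out : List (Int × Int)) : Decidable (Spec_from_cycles length cycs out) := by unfold Spec_from_cycles; infer_instance

-- ===== CLAIM (what is proved, stated in full; the proofs are below) =====
def Claim_equal_from_cycles : Prop := ∀ (length : Int) (cycs : List (List Int)), Dom_from_cycles length cycs → Pre_from_cycles length cycs → Spec_from_cycles length cycs (from_cycles length cycs)

-- ===== LEMMAS AND PROOFS =====

-- the loop state both programs maintain: the dict {k: f k for k in 1..N}, in key order
def pvRep (N : Nat) (f : Int → Int) : PySem.Dict Int Int :=
  PySem.Dict.mk ((List.range N).map (fun j : Nat => ((j : Int) + 1, f ((j : Int) + 1))))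

def pvIns (d : PySem.Dict Int Int) (kv : Int × Int) : PySem.Dict Int Int := d.insert kv.1 kv.2

-- the cycle's successor assignments, as the list of (key, value) pairs B inserts
def pvPairs (cyc : List Int) : List (Int × Int) :=
  (PySem.List.pyRange 0 (PySem.List.len cyc) 1).map
    (fun i => (PySem.List.pyGetD cyc i 0,
               PySem.List.pyGetD cyc (PySem.Int.mod (i + 1) (PySem.List.len cyc)) 0))

-- where the composed permutation sends k under one cycle
def pvSigma (cyc : List Int) (k : Int) : Int := ((pvSucc cyc).get? k).getD k

theorem pvInjNat1 : Function.Injective (fun j : Nat => (j : Int) + 1) := by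
  intro a b h; simpa using h

theorem pvRep_keys (N : Nat) (f : Int → Int) :
    (pvRep N f).keys = (List.range N).map (fun j : Nat => (j : Int) + 1) := by
  simp [pvRep, PySem.Dict.keys, List.map_map, Function.comp]

theorem pvRep_keys_nodup (N : Nat) (f : Int → Int) : (pvRep N f).keys.Nodup := by
  rw [pvRep_keys]; exact (List.nodup_range).map pvInjNat1

theorem pvRep_get? (N : Nat) (f : Int → Int) (k : Int) :
    (pvRep N f).get? k = if 1 ≤ k ∧ k ≤ (N : Int) then some (f k) else none := by
  split_ifs with h
  · apply PySem.Dict.get?_of_mem_items _ _ (pvRep_keys_nodup N f)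
    show (k, f k) ∈ (List.range N).map (fun j : Nat => ((j : Int) + 1, f ((j : Int) + 1)))
    refine List.mem_map.mpr ⟨(k - 1).toNat, List.mem_range.mpr ?_, ?_⟩
    · omega
    · have : ((k - 1).toNat : Int) + 1 = k := by omega
      rw [this]
  · rw [PySem.Dict.get?_eq_none_iff_not_mem_keys, pvRep_keys]
    intro hmem
    obtain ⟨j, hj, hjk⟩ := List.mem_map.mp hmem
    have := List.mem_range.mp hj
    omega

theorem pvRep_getD (N : Nat) (f : Int → Int) (k : Int) :
    (pvRep N f).getD k 0 = if 1 ≤ k ∧ k ≤ (N : Int) then f k else 0 := by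
  rw [PySem.Dict.getD_eq_get?_getD, pvRep_get?]
  split_ifs <;> rfl

theorem pvRep_size (N : Nat) (f : Int → Int) : (pvRep N f).size = N := by
  simp [pvRep, PySem.Dict.size]

theorem pvRep_congr {N : Nat} {f g : Int → Int}
    (h : ∀ k : Int, 1 ≤ k → k ≤ (N : Int) → f k = g k) : pvRep N f = pvRep N g := by
  apply PySem.Dict.ext
  refine List.map_congr_left (fun j hj => ?_)
  have hj' := List.mem_range.mp hj
  have := h ((j : Int) + 1) (by omega) (by omega)
  rw [this]

theorem pvRep_insert (N : Nat) (f : Int → Int) (x v : Int) (h1 : 1 ≤ x) (h2 : x ≤ (N : Int)) :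
    (pvRep N f).insert x v = pvRep N (fun k => if k = x then v else f k) := by
  apply PySem.Dict.ext
  have hc : (pvRep N f).contains x = true := by
    rw [PySem.Dict.contains_iff_mem_keys, pvRep_keys]
    refine List.mem_map.mpr ⟨(x - 1).toNat, List.mem_range.mpr (by omega), by omega⟩
  rw [PySem.Dict.items_insert_of_contains _ _ hc]
  show List.map _ (List.map _ (List.range N)) = List.map _ (List.range N)
  rw [List.map_map]
  refine List.map_congr_left (fun j hj => ?_)
  simp only [Function.comp]
  by_cases hx : (j : Int) + 1 = x
  · simp [hx]
  · simp [hx, beq_iff_eq]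

theorem pvBuild (N : Nat) (g : Int → Int) :
    (PySem.List.pyRange 0 (N : Int) 1).foldl
      (fun r i => r.insert (i + 1) (g (i + 1))) PySem.Dict.empty = pvRep N g := by
  rw [PySem.List.pyRange_zero_nat, List.foldl_map]
  apply PySem.Dict.ext
  rw [PySem.Dict.items_foldl_insert_fresh (List.range N)
        (fun j : Nat => (j : Int) + 1) (fun j : Nat => g ((j : Int) + 1)) PySem.Dict.empty
        (fun a _ => PySem.Dict.contains_empty _) ((List.nodup_range).map pvInjNat1)]
  rfl

theorem pvRange_toNat (length : Int) :
    PySem.List.pyRange 0 length 1 = PySem.List.pyRange 0 ((length.toNat : Int)) 1 := by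
  by_cases h : 0 ≤ length
  · rw [Int.toNat_of_nonneg h]
  · rw [PySem.List.pyRange_one_eq_nil (by omega), PySem.List.pyRange_one_eq_nil (by omega)]

-- the value at x after a run of inserts depends on the base only through the base's value at x
theorem get?_foldl_insert_or (L : List (Int × Int)) (d : PySem.Dict Int Int) (x : Int) :
    (L.foldl pvIns d).get? x = ((L.foldl pvIns PySem.Dict.empty).get? x).or (d.get? x) := by
  induction L using List.reverseRecOn with
  | nil => simp [PySem.Dict.get?_empty]
  | append_singleton L kv ih =>
      rw [List.foldl_append, List.foldl_append]
      simp only [List.foldl_cons, List.foldl_nil, pvIns, PySem.Dict.get?_insert]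
      split_ifs <;> simp [ih]

-- after a run of inserts, the value at x is the LAST pair with key x, else the base's value
theorem get?_foldl_last (L : List (Int × Int)) (d : PySem.Dict Int Int) (x v : Int)
    (h : (L.foldl pvIns d).get? x = some v) :
    (∃ L1 L2, L = L1 ++ (x, v) :: L2 ∧ ∀ p ∈ L2, p.1 ≠ x) ∨
      ((∀ p ∈ L, p.1 ≠ x) ∧ d.get? x = some v) := by
  induction L using List.reverseRecOn with
  | nil => exact Or.inr ⟨by simp, h⟩
  | append_singleton L kv ih =>
      rw [List.foldl_append] at h
      simp only [List.foldl_cons, List.foldl_nil, pvIns, PySem.Dict.get?_insert] at h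
      split_ifs at h with hk
      · left
        obtain rfl := Option.some_inj.mp h
        exact ⟨L, [], by simp [hk], by simp⟩
      · rcases ih h with ⟨L1, L2, hL, hlast⟩ | ⟨hnone, hd⟩
        · refine Or.inl ⟨L1, L2 ++ [kv], by simp [hL], fun p hp => ?_⟩
          rcases List.mem_append.mp hp with h' | h'
          · exact hlast p h'
          · have : p = kv := by simpa using h'
            subst this
            exact fun he => hk (he ▸ rfl)
        · refine Or.inr ⟨fun p hp => ?_, hd⟩
          rcases List.mem_append.mp hp with h' | h'
          · exact hnone p h'
          · have : p = kv := by simpa using h'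
            subst this
            exact fun he => hk (he ▸ rfl)

theorem pvSucc_eq (cyc : List Int) : pvSucc cyc = (pvPairs cyc).foldl pvIns PySem.Dict.empty := by
  rw [pvPairs, List.foldl_map]; rfl

theorem pvPairs_length (cyc : List Int) : (pvPairs cyc).length = cyc.length := by
  unfold pvPairs
  rw [List.length_map, PySem.List.len_eq, PySem.List.length_pyRange_one]
  omega

theorem pvPairs_getElem (cyc : List Int) (j : Nat) (hj : j < cyc.length) :
    (pvPairs cyc)[j]'(by rw [pvPairs_length]; exact hj)
      = (cyc.getD j 0, cyc.getD ((j + 1) % cyc.length) 0) := by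
  unfold pvPairs
  simp only [PySem.List.len_eq, List.getElem_map]
  rw [PySem.List.getElem_pyRange_one]
  simp only [zero_add]
  have hmod : PySem.Int.mod ((j : Int) + 1) (cyc.length : Int)
      = (((j + 1) % cyc.length : Nat) : Int) := by
    rw [PySem.Int.mod_eq_emod_of_pos (by omega)]
    push_cast
    omega
  rw [hmod]
  simp only [PySem.List.pyGetD_natCast]

-- under Pre_'s per-cycle condition, the successor dict sends in-range keys to in-range values
theorem pvSucc_ok (length : Int) (cyc : List Int)
    (hpre : ∀ i : Nat, i < cyc.length →
      (∀ j : Nat, j < cyc.length → i < j → cyc.getD j 0 ≠ cyc.getD i 0) →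
      1 ≤ cyc.getD i 0 → cyc.getD i 0 ≤ length →
      1 ≤ cyc.getD ((i + 1) % cyc.length) 0 ∧ cyc.getD ((i + 1) % cyc.length) 0 ≤ length)
    (k v : Int) (h : (pvSucc cyc).get? k = some v) (hk1 : 1 ≤ k) (hk2 : k ≤ length) :
    1 ≤ v ∧ v ≤ length := by
  rw [pvSucc_eq] at h
  rcases get?_foldl_last _ _ _ _ h with ⟨L1, L2, hL, hlast⟩ | ⟨_, hd⟩
  · have hlen : (pvPairs cyc).length = cyc.length := pvPairs_length cyc
    rw [hL] at hlen
    simp at hlen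
    have hi : L1.length < cyc.length := by omega
    have hat : (pvPairs cyc)[L1.length]'(by rw [pvPairs_length]; exact hi) = (k, v) := by
      simp only [hL]
      rw [List.getElem_append_right (by omega)]
      simp
    have hkv := (pvPairs_getElem cyc L1.length hi).symm.trans hat
    have hk : cyc.getD L1.length 0 = k := congrArg Prod.fst hkv
    have hv : cyc.getD ((L1.length + 1) % cyc.length) 0 = v := congrArg Prod.snd hkv
    have hlastidx : ∀ j : Nat, j < cyc.length → L1.length < j →
        cyc.getD j 0 ≠ cyc.getD L1.length 0 := by
      intro j hjn hij
      have hmem : (pvPairs cyc)[j]'(by rw [pvPairs_length]; exact hjn) ∈ L2 := by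
        simp only [hL]
        rw [List.getElem_append_right (by omega)]
        rw [List.getElem_cons]
        split_ifs with h0
        · omega
        · exact List.getElem_mem _
      have := hlast _ hmem
      rw [pvPairs_getElem cyc j hjn] at this
      rw [hk]
      exact this
    have := hpre L1.length hi hlastidx (by rw [hk]; exact hk1) (by rw [hk]; exact hk2)
    rw [hv] at this
    exact this
  · rw [PySem.Dict.get?_empty] at hd
    cases hd

theorem pvSigma_range (length : Int) (cyc : List Int)
    (hok : ∀ k v, (pvSucc cyc).get? k = some v → 1 ≤ k → k ≤ length → 1 ≤ v ∧ v ≤ length)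
    (k : Int) (h1 : 1 ≤ k) (h2 : k ≤ length) : 1 ≤ pvSigma cyc k ∧ pvSigma cyc k ≤ length := by
  unfold pvSigma
  cases h : (pvSucc cyc).get? k with
  | none => simpa using ⟨h1, h2⟩
  | some v => simpa using hok k v h h1 h2

-- A's from_cycle is the identity dict overwritten by the cycle's successor pairs
theorem pvFromCycle_eq (length : Int) (cyc : List Int) (h : cyc ≠ []) :
    pvFromCycle length cyc =
      (pvPairs cyc).foldl pvIns
        ((PySem.List.pyRange 0 length 1).foldl
          (fun r i => r.insert (i + 1) (i + 1)) PySem.Dict.empty) := by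
  have hn : 0 < cyc.length := List.length_pos_iff.mpr h
  have hnz : 0 < (cyc.length : Int) := by exact_mod_cast hn
  unfold pvFromCycle pvPairs
  simp only [PySem.List.len_eq]
  have hsplit := PySem.List.pyRange_one_succ_right (a := 0) (b := (cyc.length : Int) - 1) (by omega)
  rw [show ((cyc.length : Int) - 1) + 1 = (cyc.length : Int) from by ring] at hsplit
  rw [hsplit, List.map_append, List.foldl_append]
  simp only [List.foldl_map]
  have hpref :
      ∀ (base : PySem.Dict Int Int),
      (PySem.List.pyRange 0 ((cyc.length : Int) - 1) 1).foldl
          (fun s i => pvIns s (PySem.List.pyGetD cyc i 0,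
            PySem.List.pyGetD cyc (PySem.Int.mod (i + 1) (cyc.length : Int)) 0)) base
        = (PySem.List.pyRange 0 ((cyc.length : Int) - 1) 1).foldl
          (fun r i => r.insert (PySem.List.pyGetD cyc i 0) (PySem.List.pyGetD cyc (i + 1) 0)) base := by
    intro base
    refine PySem.List.foldl_congr_mem _ _ _ _ (fun acc i hi => ?_)
    have hi' := PySem.List.mem_pyRange_one.mp hi
    have hmod : PySem.Int.mod (i + 1) (cyc.length : Int) = i + 1 := by
      rw [PySem.Int.mod_eq_emod_of_pos hnz]
      exact Int.emod_eq_of_lt (by omega) (by omega)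
    rw [pvIns, hmod]
  rw [hpref]
  simp only [List.foldl_cons, List.foldl_nil, pvIns]
  have hmodn : PySem.Int.mod ((cyc.length : Int) - 1 + 1) (cyc.length : Int) = 0 := by
    rw [show ((cyc.length : Int) - 1) + 1 = (cyc.length : Int) from by ring,
        PySem.Int.mod_eq_emod_of_pos hnz, Int.emod_self]
  rw [hmodn]
  have hlast : PySem.List.pyGetD cyc (-1) 0 = PySem.List.pyGetD cyc ((cyc.length : Int) - 1) 0 := by
    rw [PySem.List.pyGetD_neg_one cyc 0 h,
        PySem.List.pyGetD_eq_getElem cyc 0 (by omega) (by omega)]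
    rw [List.getLast_eq_getElem]
    congr 1
    omega
  rw [hlast]

-- the composed-permutation lookup A performs equals pvSigma on in-range keys
theorem pvFromCycle_getD (length : Int) (cyc : List Int) (hne : cyc ≠ [])
    (k : Int) (h1 : 1 ≤ k) (h2 : k ≤ length) :
    (pvFromCycle length cyc).getD k 0 = pvSigma cyc k := by
  rw [pvFromCycle_eq length cyc hne, PySem.Dict.getD_eq_get?_getD,
      get?_foldl_insert_or, ← pvSucc_eq, pvRange_toNat length, pvBuild length.toNat (fun k => k),
      pvRep_get?]
  have hin : 1 ≤ k ∧ k ≤ (length.toNat : Int) := ⟨h1, by omega⟩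
  rw [if_pos hin]
  unfold pvSigma
  cases h : (pvSucc cyc).get? k <;> rfl

theorem stepA_eq (length : Int) (cyc : List Int) (f : Int → Int)
    (hne : cyc ≠ []) (hok : ∀ k v, (pvSucc cyc).get? k = some v → 1 ≤ k → k ≤ length → 1 ≤ v ∧ v ≤ length) :
    pvCalPerm (pvRep length.toNat f) (pvFromCycle length cyc) =
      pvRep length.toNat (fun k => f (pvSigma cyc k)) := by
  unfold pvCalPerm
  rw [pvRep_size,
      pvBuild length.toNat (fun k => (pvRep length.toNat f).getD ((pvFromCycle length cyc).getD k 0) 0)]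
  refine pvRep_congr (fun k hk1 hk2 => ?_)
  have hk2' : k ≤ length := by omega
  rw [pvFromCycle_getD length cyc hne k hk1 hk2', pvRep_getD]
  have hs := pvSigma_range length cyc hok k hk1 hk2'
  rw [if_pos ⟨hs.1, by omega⟩]

-- pointwise override of f by an association list (B's in-place update, as a function)
def pvOver (U : List (Int × Int)) (f : Int → Int) : Int → Int :=
  U.foldl (fun g kv => fun x => if x = kv.1 then kv.2 else g x) f

theorem pvOver_congr_at (U : List (Int × Int)) {f g : Int → Int} (k : Int) (h : f k = g k) :
    pvOver U f k = pvOver U g k := by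
  induction U generalizing f g with
  | nil => exact h
  | cons p U ih =>
      refine ih ?_
      by_cases hk : k = p.1 <;> simp [hk, h]

theorem pvOver_not_mem (U : List (Int × Int)) (f : Int → Int) (k : Int)
    (h : k ∉ U.map Prod.fst) : pvOver U f k = f k := by
  induction U generalizing f with
  | nil => rfl
  | cons p U ih =>
      have hk : k ≠ p.1 := fun hk => h (by simp [hk])
      have h' : k ∉ U.map Prod.fst := fun hm => h (by simp [hm])
      calc pvOver (p :: U) f k = pvOver U (fun x => if x = p.1 then p.2 else f x) k := rfl
        _ = pvOver U f k := pvOver_congr_at U k (by simp [hk])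
        _ = f k := ih f h'

theorem pvOver_nodup_mem (U : List (Int × Int)) (f : Int → Int) (k w : Int)
    (hnd : (U.map Prod.fst).Nodup) (hm : (k, w) ∈ U) : pvOver U f k = w := by
  induction U generalizing f with
  | nil => cases hm
  | cons p U ih =>
      rcases List.mem_cons.mp hm with h | h
      · subst h
        have hnot : k ∉ U.map Prod.fst := (List.nodup_cons.mp (by simpa using hnd)).1
        show pvOver U (fun x => if x = k then w else f x) k = w
        rw [pvOver_not_mem U _ k hnot]
        simp
      · exact ih _ (List.nodup_cons.mp (by simpa using hnd)).2 h

theorem foldl_insert_pvRep (N : Nat) (U : List (Int × Int)) (f : Int → Int)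
    (hU : ∀ p ∈ U, 1 ≤ p.1 ∧ p.1 ≤ (N : Int)) :
    U.foldl pvIns (pvRep N f) = pvRep N (pvOver U f) := by
  induction U generalizing f with
  | nil => rfl
  | cons p U ih =>
      have hp := hU p (by simp)
      rw [List.foldl_cons, show pvIns (pvRep N f) p = (pvRep N f).insert p.1 p.2 from rfl,
          pvRep_insert N f p.1 p.2 hp.1 hp.2, ih _ (fun q hq => hU q (by simp [hq]))]
      rfl

theorem pvSucc_keys_nodup (cyc : List Int) : (pvSucc cyc).keys.Nodup := by
  unfold pvSucc
  exact PySem.Dict.nodup_keys_foldl_insert_key _ _ _ _ PySem.Dict.nodup_keys_empty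

-- a dict-comprehension with a filter is the plain comprehension over the filtered list
theorem foldl_insert_if (L : List (Int × Int)) (p : Int × Int → Bool) (g : Int × Int → Int)
    (d : PySem.Dict Int Int) :
    L.foldl (fun u kv => if p kv then u.insert kv.1 (g kv) else u) d
      = (L.filter p).foldl (fun u kv => u.insert kv.1 (g kv)) d := by
  induction L generalizing d with
  | nil => rfl
  | cons a L ih =>
      rw [List.foldl_cons, List.filter_cons]
      by_cases hp : p a
      · rw [if_pos hp, if_pos hp, List.foldl_cons]
        exact ih _
      · rw [if_neg hp, if_neg hp]
        exact ih _

theorem stepB_eq (length : Int) (cyc : List Int) (f : Int → Int)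
    (hok : ∀ k v, (pvSucc cyc).get? k = some v → 1 ≤ k → k ≤ length → 1 ≤ v ∧ v ≤ length) :
    pvStepB (pvRep length.toNat f) cyc = pvRep length.toNat (fun k => f (pvSigma cyc k)) := by
  unfold pvStepB
  simp only []
  rw [foldl_insert_if]
  have hsub : (((pvSucc cyc).items.filter
      (fun kv => (pvRep length.toNat f).contains kv.1)).map Prod.fst).Sublist (pvSucc cyc).keys :=
    List.Sublist.map Prod.fst List.filter_sublist
  have hndF : (((pvSucc cyc).items.filter
      (fun kv => (pvRep length.toNat f).contains kv.1)).map Prod.fst).Nodup :=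
    hsub.nodup (pvSucc_keys_nodup cyc)
  have hupd :
      (((pvSucc cyc).items.filter (fun kv => (pvRep length.toNat f).contains kv.1)).foldl
          (fun u kv => u.insert kv.1 ((pvRep length.toNat f).getD kv.2 0)) PySem.Dict.empty).items
        = ((pvSucc cyc).items.filter (fun kv => (pvRep length.toNat f).contains kv.1)).map
            (fun kv => (kv.1, (pvRep length.toNat f).getD kv.2 0)) := by
    have := PySem.Dict.items_foldl_insert_fresh (ν := Int)
      ((pvSucc cyc).items.filter (fun kv => (pvRep length.toNat f).contains kv.1)) Prod.fst
      (fun kv => (pvRep length.toNat f).getD kv.2 0) PySem.Dict.empty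
      (fun p _ => PySem.Dict.contains_empty _) hndF
    simpa using this
  have hAU : ∀ (ps : List (Int × Int)),
      PySem.Dict.update (pvRep length.toNat f) ps = ps.foldl pvIns (pvRep length.toNat f) :=
    fun ps => rfl
  rw [hAU, hupd]
  have hbounds : ∀ q ∈ ((pvSucc cyc).items.filter
        (fun kv => (pvRep length.toNat f).contains kv.1)).map
        (fun kv => (kv.1, (pvRep length.toNat f).getD kv.2 0)),
      1 ≤ q.1 ∧ q.1 ≤ (length.toNat : Int) := by
    intro q hq
    obtain ⟨kv, hkv, rfl⟩ := List.mem_map.mp hq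
    have hc : (pvRep length.toNat f).contains kv.1 = true := (List.mem_filter.mp hkv).2
    have hmem := (PySem.Dict.contains_iff_mem_keys _ _).mp hc
    rw [pvRep_keys] at hmem
    obtain ⟨j, hj, hjk⟩ := List.mem_map.mp hmem
    have := List.mem_range.mp hj
    constructor <;> omega
  rw [foldl_insert_pvRep length.toNat _ f hbounds]
  refine pvRep_congr (fun k hk1 hk2 => ?_)
  have hkeysF : (((pvSucc cyc).items.filter
        (fun kv => (pvRep length.toNat f).contains kv.1)).map
        (fun kv : Int × Int => (kv.1, (pvRep length.toNat f).getD kv.2 0))).map Prod.fst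
      = ((pvSucc cyc).items.filter
        (fun kv => (pvRep length.toNat f).contains kv.1)).map Prod.fst := by
    rw [List.map_map]
    rfl
  have hcont : (pvRep length.toNat f).contains k = true := by
    rw [PySem.Dict.contains_iff_mem_keys, pvRep_keys]
    exact List.mem_map.mpr ⟨(k - 1).toNat, List.mem_range.mpr (by omega), by omega⟩
  cases hg : (pvSucc cyc).get? k with
  | none =>
      have hnot : k ∉ (pvSucc cyc).keys :=
        (PySem.Dict.get?_eq_none_iff_not_mem_keys _ _).mp hg
      have hnot' : k ∉ ((pvSucc cyc).items.filter
          (fun kv => (pvRep length.toNat f).contains kv.1)).map Prod.fst :=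
        fun hm => hnot (hsub.mem hm)
      rw [pvOver_not_mem _ _ _ (by rw [hkeysF]; exact hnot')]
      simp [pvSigma, hg]
  | some v =>
      have hmemF : (k, v) ∈ (pvSucc cyc).items.filter
          (fun kv => (pvRep length.toNat f).contains kv.1) :=
        List.mem_filter.mpr ⟨PySem.Dict.mem_items_of_get?_eq_some _ hg, hcont⟩
      have hmem : (k, (pvRep length.toNat f).getD v 0) ∈ ((pvSucc cyc).items.filter
          (fun kv => (pvRep length.toNat f).contains kv.1)).map
          (fun kv : Int × Int => (kv.1, (pvRep length.toNat f).getD kv.2 0)) :=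
        List.mem_map.mpr ⟨(k, v), hmemF, rfl⟩
      rw [pvOver_nodup_mem _ f k _ (by rw [hkeysF]; exact hndF) hmem, pvRep_getD]
      have hvb := hok k v hg hk1 (by omega)
      rw [if_pos ⟨hvb.1, by omega⟩]
      simp [pvSigma, hg]

theorem pvFold_eq (length : Int) (cycs : List (List Int))
    (hpre : ∀ cyc ∈ cycs, cyc ≠ [] ∧ ∀ i : Nat, i < cyc.length →
      (∀ j : Nat, j < cyc.length → i < j → cyc.getD j 0 ≠ cyc.getD i 0) →
      1 ≤ cyc.getD i 0 → cyc.getD i 0 ≤ length →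
      1 ≤ cyc.getD ((i + 1) % cyc.length) 0 ∧ cyc.getD ((i + 1) % cyc.length) 0 ≤ length)
    (f : Int → Int) :
    cycs.foldl (fun result cyc => pvCalPerm result (pvFromCycle length cyc)) (pvRep length.toNat f)
      = cycs.foldl pvStepB (pvRep length.toNat f) := by
  induction cycs generalizing f with
  | nil => rfl
  | cons c cs ih =>
      have hc := hpre c (by simp)
      have hok : ∀ k v, (pvSucc c).get? k = some v → 1 ≤ k → k ≤ length → 1 ≤ v ∧ v ≤ length :=
        fun k v h hk1 hk2 => pvSucc_ok length c hc.2 k v h hk1 hk2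
      rw [List.foldl_cons, List.foldl_cons, stepA_eq length c f hc.1 hok,
          stepB_eq length c f hok]
      exact ih (fun cyc hcyc => hpre cyc (by simp [hcyc])) _

-- ===== VERDICT (by name: the statement is the Claim_ definition above) =====
theorem from_cycles_spec : Claim_equal_from_cycles := by
  intro length cycs _dom hpre
  unfold Spec_from_cycles from_cycles from_cycles_alt
  simp only []
  rw [pvRange_toNat length, pvBuild length.toNat (fun k => k), pvFold_eq length cycs hpre]
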